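-- pv_equiv track=rewrite | github.com/Bae-hong-seob/- | 이것이 코딩 테스트다 문제모음/12장(구현)/12-3 문자열 압축.py | solution
-- ===== SOURCE A (Python) =====
-- def solution(s):
--     candidates = []
--
--     for length in range(1,(len(s)//2)+1): ## 절반길이까지만 테스트해보면 됨.
--         candidate = [s[i:i+length] for i in range(0,len(s),length)]
--         stacks = []
--         for i in candidate:
--             if len(stacks) == 0:
--                 stacks.append([i,1])
--             elif stacks[-1][0] == i: # 연속되는 경우
--                 count = stacks[-1][1] +1
--                 stacks.pop()
--                 stacks.append([i,count])
--             else: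
--                 stacks.append([i,1])
--
--         encode = ''
--         for stack in stacks:
--             if stack[1] == 1: # 한 개인 경우 그냥 더하기
--                 encode+=stack[0]
--             else:
--                 encode+=str(stack[1])+stack[0]
--
--         candidates.append(encode)
--
--     answers = [len(i) for i in candidates]
--     answers.append(len(s)) # 절반 길이만 고려하였으므로 전체 길이를 고려
--
--     return min(answers)
-- ===== SOURCE B (Python) =====
-- def solution(s):
--     # For each chunk size L, instead of slicing the string into chunks and
--     # run-length-encoding a stack of chunk strings, compute a character-level
--     # match array eq where eq[i] counts consecutive positions j >= i with
--     # s[j] == s[j + L]; two adjacent full chunks starting at p and p+L are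
--     # equal iff eq[p] >= L.  The compressed length is then counted purely
--     # arithmetically (len(str(run)) digits), without building any strings.
--     n = len(s)
--     best = n
--     for L in range(1, n // 2 + 1):
--         eq = [0] * (n + 1)
--         for i in range(n - L - 1, -1, -1):
--             eq[i] = eq[i + 1] + 1 if s[i] == s[i + L] else 0
--         k, r = divmod(n, L)
--         total = r          # a trailing partial chunk is always its own run
--         run = 1
--         for j in range(1, k):
--             if eq[(j - 1) * L] >= L:
--                 run += 1
--             else:
--                 total += L + (len(str(run)) if run > 1 else 0)
--                 run = 1
--         total += L + (len(str(run)) if run > 1 else 0)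
--         if total < best:
--             best = total
--     return best
-- ===== Notes on version B (the rewrite author's own statement) =====
-- stated objective: alternative
-- what changed: B never slices the string into chunk strings nor run-length-encodes a stack of chunks: for each chunk size L it builds a character-level match-length array eq (eq[i] = consecutive positions j>=i with s[j]==s[j+L], filled by a backward DP), decides adjacent-chunk equality by the arithmetic test eq[(j-1)*L] >= L, and counts the compressed length with divmod and digit counts instead of building encoded strings.
import Mathlib
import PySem

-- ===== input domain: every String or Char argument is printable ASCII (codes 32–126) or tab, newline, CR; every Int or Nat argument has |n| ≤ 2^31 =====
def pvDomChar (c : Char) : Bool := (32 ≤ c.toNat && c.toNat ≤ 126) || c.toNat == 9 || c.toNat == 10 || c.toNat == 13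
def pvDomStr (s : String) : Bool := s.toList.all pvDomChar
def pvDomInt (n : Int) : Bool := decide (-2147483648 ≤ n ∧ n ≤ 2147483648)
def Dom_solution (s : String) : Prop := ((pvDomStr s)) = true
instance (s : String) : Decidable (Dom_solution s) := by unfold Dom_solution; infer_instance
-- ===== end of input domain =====

-- B replaces A's chunk-slicing / run-length-encoding of chunk strings by a character-level
-- match-length array per chunk size, deciding chunk equality arithmetically and counting
-- lengths instead of building strings (objective: alternative algorithm, same asymptotics).

-- ===== PORT A =====
-- the piece each stack entry contributes to the encoded string
def encodePiece (st : List Char × Int) : List Char :=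
  if st.2 == 1 then st.1 else PySem.Int.toChars st.2 ++ st.1

-- one iteration of A's stack loop (stacks[-1] / pop / append)
def stepA (stks : List (List Char × Int)) (c : List Char) : List (List Char × Int) :=
  match stks.getLast? with
  | none => stks ++ [(c, 1)]
  | some st => if st.1 == c then stks.dropLast ++ [(c, st.2 + 1)] else stks ++ [(c, 1)]

def solution (s : String) : Int :=
  let cs := s.toList
  let n : Int := PySem.Str.len s
  let candidates : List (List Char) :=
    (PySem.List.pyRange 1 (PySem.Int.floordiv n 2 + 1) 1).map (fun L =>
      let candidate := (PySem.List.pyRange 0 n L).map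
        (fun i => PySem.List.slice cs (some i) (some (i + L)))
      let stks := candidate.foldl stepA []
      stks.foldl (fun e st => e ++ encodePiece st) [])
  let answers : List Int := candidates.map (fun e => (e.length : Int)) ++ [n]
  match PySem.List.min? answers (fun x => x) with
  | some m => m
  | none => 0

-- ===== PORT B =====
-- (len(str(run)) if run > 1 else 0)
def digLen (run : Int) : Int :=
  if 1 < run then ((PySem.Int.toChars run).length : Int) else 0

def solution_alt (s : String) : Int :=
  let cs := s.toList
  let n : Int := PySem.Str.len s
  (PySem.List.pyRange 1 (PySem.Int.floordiv n 2 + 1) 1).foldl (fun best L =>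
    -- eq = [0]*(n+1); for i in range(n-L-1, -1, -1): eq[i] = eq[i+1]+1 if s[i]==s[i+L] else 0
    let eqA := (PySem.List.pyRange (n - L - 1) (-1) (-1)).foldl (fun eq i =>
      PySem.List.pySetD eq i
        (if PySem.List.pyGet? cs i == PySem.List.pyGet? cs (i + L)
         then PySem.List.pyGetD eq (i + 1) 0 + 1 else 0))
      (List.replicate (n + 1).toNat 0)
    let k := PySem.Int.floordiv n L
    let r := PySem.Int.mod n L
    let fin := (PySem.List.pyRange 1 k 1).foldl (fun st j =>
      if L ≤ PySem.List.pyGetD eqA ((j - 1) * L) 0 then (st.1 + 1, st.2)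
      else (1, st.2 + L + digLen st.1)) ((1 : Int), r)
    let total := fin.2 + L + digLen fin.1
    if total < best then total else best) n

-- ===== PRECONDITION & SPEC =====
def Spec_solution (s : String) (out : Int) : Prop := out = solution_alt s
instance (s : String) (out : Int) : Decidable (Spec_solution s out) := by unfold Spec_solution; infer_instance

-- ===== CLAIM (what is proved, stated in full; the proofs are below) =====
def Claim_equal_solution : Prop := ∀ (s : String), Dom_solution s → Spec_solution s (solution s)

-- ===== LEMMAS AND PROOFS =====

-- proof-side: chunk of size L starting at character p
def ch (cs : List Char) (L p : Nat) : List Char := (cs.drop p).take L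

-- proof-side: length contributed by one finished run of A's stack
def contribB (prev : List Char) (count : Int) : Int :=
  if count == 1 then (prev.length : Int)
  else ((PySem.Int.toChars count).length : Int) + (prev.length : Int)

-- proof-side reference fold matching A's stack semantics, carrying (prev, run, tot)
def stepB (st : List Char × Int × Int) (cur : List Char) : List Char × Int × Int :=
  if cur == st.1 then (st.1, st.2.1 + 1, st.2.2)
  else (cur, 1, st.2.2 + contribB st.1 st.2.1)

-- proof-side: B's per-j step expressed on chunk equality
def stepJN (cs : List Char) (L : Nat) (st : Int × Int) (j : Nat) : Int × Int :=
  if ch cs L ((j - 1) * L) = ch cs L (j * L) then (st.1 + 1, st.2)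
  else (1, st.2 + (L : Int) + digLen st.1)

-- proof-side: the recurrence B's eq array satisfies
def eqFun (cs : List Char) (L : Nat) (i : Nat) : Int :=
  if h : i + L < cs.length then
    (if cs[i]'(by omega) = cs[i + L]'(h) then eqFun cs L (i + 1) + 1 else 0)
  else 0
termination_by cs.length - i
decreasing_by omega

-- proof-side: one backward step of B's eq-array construction, on Nat indices
def eqStep (cs : List Char) (L : Nat) (i : Nat) (eq : List Int) : List Int :=
  eq.set i (if cs[i]? = cs[i + L]? then eq.getD (i + 1) 0 + 1 else 0)

-- proof-side: the common value both per-L computations reduce to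
def Jfold (cs : List Char) (L : Nat) : Int × Int :=
  List.foldl (stepJN cs L) (1, 0) (List.range' 1 (cs.length / L - 1))

lemma eqFun_nonneg (cs : List Char) (L : Nat) (i : Nat) : 0 ≤ eqFun cs L i := by
  fun_induction eqFun cs L i with
  | case1 i h hc ih => omega
  | case2 i h hc => omega
  | case3 i h => omega

lemma eqFun_ge_iff (cs : List Char) (L : Nat) :
    ∀ (m i : Nat), ((m : Int) ≤ eqFun cs L i ↔ ∀ t < m, i + t + L < cs.length ∧ cs[i + t]? = cs[i + t + L]?) := by
  intro m
  induction m with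
  | zero =>
    intro i
    constructor
    · intro _ t ht; omega
    · intro _; exact_mod_cast eqFun_nonneg cs L i
  | succ m ih =>
    intro i
    rw [eqFun]
    by_cases h : i + L < cs.length
    · rw [dif_pos h]
      by_cases hc : cs[i]'(by omega) = cs[i + L]'(h)
      · rw [if_pos hc]
        constructor
        · intro hge t ht
          rcases Nat.eq_zero_or_pos t with rfl | htp
          · refine ⟨by omega, ?_⟩
            rw [List.getElem?_eq_getElem (by omega), List.getElem?_eq_getElem (by simpa using h)]
            simpa using hc
          · have := ((ih (i + 1)).1 (by omega)) (t - 1) (by omega)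
            have harr : i + 1 + (t - 1) = i + t := by omega
            rw [harr] at this
            exact this
        · intro hall
          have : (m : Int) ≤ eqFun cs L (i + 1) := by
            apply (ih (i + 1)).2
            intro t ht
            have := hall (t + 1) (by omega)
            have harr : i + (t + 1) = i + 1 + t := by omega
            rw [harr] at this
            exact this
          push_cast
          omega
      · rw [if_neg hc]
        constructor
        · intro hge; exfalso; omega
        · intro hall
          exfalso
          have := hall 0 (by omega)
          simp only [Nat.add_zero] at this
          rw [List.getElem?_eq_getElem (by omega), List.getElem?_eq_getElem (by simpa using h)] at this
          exact hc (by simpa using this.2)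
    · rw [dif_neg h]
      constructor
      · intro hge; exfalso; omega
      · intro hall
        exfalso
        have := hall 0 (by omega)
        omega

lemma chunk_eq_iff (cs : List Char) (L p : Nat) (hL : 0 < L) (hp : p + 2 * L ≤ cs.length) :
    ch cs L p = ch cs L (p + L) ↔ (L : Int) ≤ eqFun cs L p := by
  rw [eqFun_ge_iff]
  unfold ch
  constructor
  · intro he t ht
    refine ⟨by omega, ?_⟩
    have h1 : ((cs.drop p).take L)[t]'(by simp; omega) = ((cs.drop (p + L)).take L)[t]'(by
      simp; omega) := by simp only [he]
    rw [List.getElem_take, List.getElem_drop] at h1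
    rw [List.getElem_take, List.getElem_drop] at h1
    rw [List.getElem?_eq_getElem (by omega), List.getElem?_eq_getElem (by omega)]
    refine congrArg some ?_
    have harr : cs[p + t + L]'(by omega) = cs[p + L + t]'(by omega) := by
      congr 1; omega
    rw [harr]
    exact h1
  · intro hall
    apply List.ext_getElem
    · simp; omega
    · intro t h1 h2
      rw [List.getElem_take, List.getElem_drop, List.getElem_take, List.getElem_drop]
      have ht : t < L := by simp at h1; omega
      have := (hall t ht).2
      rw [List.getElem?_eq_getElem (by omega), List.getElem?_eq_getElem (by omega)] at this
      have h3 : cs[p + t + L]'(by omega) = cs[p + L + t]'(by omega) := by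
        congr 1; omega
      rw [h3] at this
      exact Option.some_injective _ this

lemma length_foldr_eqStep (cs : List Char) (L : Nat) (l : List Nat) (init : List Int) :
    (List.foldr (eqStep cs L) init l).length = init.length := by
  induction l with
  | nil => rfl
  | cons x t ih => simp [eqStep, ih]

lemma eqBuild_spec (cs : List Char) (L : Nat) :
    ∀ (m a : Nat), a + m = cs.length - L → ∀ i : Nat,
    (List.foldr (eqStep cs L) (List.replicate (cs.length + 1) 0) (List.range' a m)).getD i 0
      = if a ≤ i ∧ i < a + m then eqFun cs L i else 0 := by
  intro m
  induction m with
  | zero =>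
    intro a _ i
    rw [if_neg (by omega)]
    simp [List.getD_eq_getElem?_getD, List.getElem?_replicate]
    split_ifs <;> rfl
  | succ m ih =>
    intro a ha i
    have hlen : a + L < cs.length := by omega
    rw [List.range'_succ, List.foldr_cons]
    set E : List Int := List.foldr (eqStep cs L) (List.replicate (cs.length + 1) 0) (List.range' (a+1) m) with hE
    have hElen : E.length = cs.length + 1 := by
      rw [hE, length_foldr_eqStep, List.length_replicate]
    have hnext : E.getD (a + 1) 0 = eqFun cs L (a + 1) := by
      rw [ih (a+1) (by omega) (a+1)]
      by_cases hm : 0 < m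
      · rw [if_pos (by omega)]
      · rw [if_neg (by omega)]
        rw [eqFun, dif_neg (by omega)]
    have hv : (if cs[a]? = cs[a + L]? then E.getD (a + 1) 0 + 1 else 0) = eqFun cs L a := by
      rw [hnext]
      conv_rhs => rw [eqFun]
      rw [dif_pos hlen]
      by_cases hc : cs[a]'(by omega) = cs[a + L]'(hlen)
      · rw [if_pos hc, if_pos]
        rw [List.getElem?_eq_getElem (by omega), List.getElem?_eq_getElem hlen]
        exact congrArg some hc
      · rw [if_neg hc, if_neg]
        rw [List.getElem?_eq_getElem (by omega), List.getElem?_eq_getElem hlen]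
        intro hcon
        exact hc (Option.some_injective _ hcon)
    unfold eqStep
    rw [hv]
    by_cases hi : i = a
    · subst hi
      rw [if_pos (by omega)]
      rw [List.getD_eq_getElem?_getD, List.getElem?_set_self (by omega)]
      rfl
    · rw [List.getD_eq_getElem?_getD, List.getElem?_set_ne (fun h => hi h.symm),
        ← List.getD_eq_getElem?_getD, ih (a+1) (by omega) i]
      by_cases hc2 : a + 1 ≤ i ∧ i < a + 1 + m
      · rw [if_pos hc2, if_pos (by omega)]
      · rw [if_neg hc2, if_neg (by omega)]

lemma foldJN_run_pos (cs : List Char) (L : Nat) (l : List Nat) :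
    ∀ run tot : Int, 1 ≤ run → 1 ≤ (List.foldl (stepJN cs L) (run, tot) l).1 := by
  induction l with
  | nil => intro run tot h; exact h
  | cons x t ih =>
    intro run tot h
    simp only [List.foldl_cons, stepJN]
    split_ifs
    · exact ih _ _ (by omega)
    · exact ih _ _ (by omega)

lemma foldJN_shift (cs : List Char) (L : Nat) (l : List Nat) :
    ∀ (run t : Int),
    List.foldl (stepJN cs L) (run, t) l
      = ((List.foldl (stepJN cs L) (run, 0) l).1, t + (List.foldl (stepJN cs L) (run, 0) l).2) := by
  induction l with
  | nil => intro run t; simp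
  | cons x l ih =>
    intro run t
    simp only [List.foldl_cons, stepJN]
    split_ifs
    · rw [ih (run+1) t, ih (run+1) 0]
    · rw [ih 1 (t + ↑L + digLen run), ih 1 ((0:Int) + ↑L + digLen run)]
      simp only [Prod.mk.injEq, true_and]
      ring

lemma contribB_full (p : List Char) (L : Nat) (c : Int) (hp : p.length = L) (hc : 1 ≤ c) :
    contribB p c = (L : Int) + digLen c := by
  by_cases h : c = 1 <;> simp [contribB, digLen, h, hp] <;> omega

lemma length_ch (cs : List Char) (L p : Nat) : (ch cs L p).length = min L (cs.length - p) := by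
  simp [ch]

lemma loop_corr (cs : List Char) (L k : Nat) (hL : 0 < L) (hk : k * L ≤ cs.length) :
    ∀ (m a : Nat) (run tot : Int), 1 ≤ a → a + m = k → 1 ≤ run →
    List.foldl stepB (ch cs L ((a - 1) * L), run, tot) ((List.range' a m).map (fun t => ch cs L (t * L)))
      = (ch cs L ((k - 1) * L), List.foldl (stepJN cs L) (run, tot) (List.range' a m)) := by
  intro m
  induction m with
  | zero =>
    intro a run tot ha hak hrun
    have : a = k := by omega
    subst this
    simp
  | succ m ih =>
    intro a run tot ha hak hrun
    rw [List.range'_succ, List.map_cons, List.foldl_cons, List.foldl_cons]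
    have hlenprev : (ch cs L ((a - 1) * L)).length = L := by
      rw [length_ch]
      have h1 : (a - 1) * L + L = a * L := by
        have h0 : a - 1 + 1 = a := by omega
        calc (a-1) * L + L = (a - 1 + 1) * L := by ring
        _ = a * L := by rw [h0]
      have hak2 : a * L ≤ cs.length := le_trans (Nat.mul_le_mul_right _ (by omega)) hk
      omega
    by_cases he : ch cs L (a * L) = ch cs L ((a - 1) * L)
    · have hsB : stepB (ch cs L ((a - 1) * L), run, tot) (ch cs L (a * L))
          = (ch cs L (a * L), run + 1, tot) := by
        simp [stepB, he]
      have hsJ : stepJN cs L (run, tot) a = (run + 1, tot) := by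
        simp [stepJN, he.symm]
      rw [hsB, hsJ]
      have := ih (a + 1) (run + 1) tot (by omega) (by omega) (by omega)
      simpa using this
    · have hsB : stepB (ch cs L ((a - 1) * L), run, tot) (ch cs L (a * L))
          = (ch cs L (a * L), 1, tot + (L : Int) + digLen run) := by
        simp [stepB, he]
        rw [contribB_full _ L run hlenprev hrun]
        ring
      have hsJ : stepJN cs L (run, tot) a = (1, tot + (L : Int) + digLen run) := by
        rw [stepJN, if_neg (fun h => he h.symm)]
      rw [hsB, hsJ]
      have := ih (a + 1) 1 (tot + (L : Int) + digLen run) (by omega) (by omega) (by omega)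
      simpa using this

-- ==== A-side lemmas (stack fold → stepB fold) ====

lemma foldl_stepA_append (l : List (List Char)) :
    ∀ (stk : List (List Char × Int)) (p : List Char) (c : Int),
    List.foldl stepA (stk ++ [(p, c)]) l = stk ++ List.foldl stepA [(p, c)] l := by
  induction l with
  | nil => intro stk p c; rfl
  | cons x t ih =>
    intro stk p c
    simp only [List.foldl_cons]
    by_cases hpx : p = x
    · have h1 : stepA (stk ++ [(p, c)]) x = stk ++ [(p, c + 1)] := by simp [stepA, hpx]
      have h2 : stepA [(p, c)] x = [(p, c + 1)] := by simp [stepA, hpx]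
      rw [h1, h2, ih]
    · have h1 : stepA (stk ++ [(p, c)]) x = (stk ++ [(p, c)]) ++ [(x, 1)] := by
        simp [stepA, hpx]
      have h2 : stepA [(p, c)] x = [(p, c)] ++ [(x, 1)] := by
        simp [stepA, hpx]
      rw [h1, h2, ih (stk ++ [(p, c)]) x 1, ih [(p, c)] x 1, List.append_assoc]

lemma encode_len (stk : List (List Char × Int)) :
    ∀ (e : List Char),
    (((stk.foldl (fun e st => e ++ encodePiece st) e).length : Int))
      = (e.length : Int) + (stk.map (fun st => ((encodePiece st).length : Int))).sum := by
  induction stk with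
  | nil => intro e; simp
  | cons st t ih =>
    intro e
    simp only [List.foldl_cons, List.map_cons, List.sum_cons, ih, List.length_append]
    push_cast
    ring

lemma contribB_eq (p : List Char) (c : Int) :
    contribB p c = ((encodePiece (p, c)).length : Int) := by
  by_cases h : c = 1 <;> simp [contribB, encodePiece, h, List.length_append]

-- core: the running count/total of the stepB fold equals the length of A's encoding of the same chunks
lemma main_core (l : List (List Char)) :
    ∀ (p : List Char) (c t : Int),
    (let fin := l.foldl stepB (p, c, t)
     fin.2.2 + contribB fin.1 fin.2.1)
      = t + ((List.foldl stepA [(p, c)] l).map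
              (fun st => ((encodePiece st).length : Int))).sum := by
  induction l with
  | nil =>
    intro p c t
    simp [contribB_eq]
  | cons x l ih =>
    intro p c t
    simp only [List.foldl_cons]
    by_cases hx : x = p
    · have hsB : stepB (p, c, t) x = (p, c + 1, t) := by simp [stepB, hx]
      have hsA : stepA [(p, c)] x = [(p, c + 1)] := by simp [stepA, hx]
      rw [hsB, hsA]; exact ih p (c + 1) t
    · have hsB : stepB (p, c, t) x = (x, 1, t + contribB p c) := by
        simp [stepB, hx]
      have hsA : stepA [(p, c)] x = [(p, c)] ++ [(x, 1)] := by
        simp [stepA]; intro h; exact absurd h.symm hx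
      rw [hsB, hsA, foldl_stepA_append]
      simp only [List.map_append, List.sum_append, List.map_cons, List.map_nil,
        List.sum_cons, List.sum_nil]
      have := ih x 1 (t + contribB p c)
      simp only at this ⊢
      rw [this, contribB_eq]
      ring

-- min over a running fold
lemma foldl_min_comm (t : List Int) : ∀ (a b : Int),
    List.foldl min (min a b) t = min a (List.foldl min b t) := by
  induction t with
  | nil => intro a b; rfl
  | cons y t ih =>
    intro a b
    simp only [List.foldl_cons, min_assoc, ih]

lemma minfold (xs : List Int) (a : Int) :
    (match PySem.List.min? (xs ++ [a]) (fun x => x) with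
     | some m => m | none => 0)
      = xs.foldl (fun b x => if x < b then x else b) a := by
  have hf : (fun (b x : Int) => if x < b then x else b) = (fun b x => min b x) := by
    funext b x; rw [min_def]; split_ifs <;> omega
  rw [hf]
  cases xs with
  | nil => simp [PySem.List.min?_id_cons]
  | cons x t =>
    have hx : (x :: t) ++ [a] = x :: (t ++ [a]) := rfl
    rw [hx, PySem.List.min?_id_cons]
    simp only [List.foldl_append, List.foldl_cons, List.foldl_nil]
    rw [show (fun (b x : Int) => min b x) = (min : Int → Int → Int) from rfl,
      foldl_min_comm]
    exact min_comm _ _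

-- range(0, n, L) starts with 0 and continues as range(L, n, L)
lemma pyRange_step_cons (n L : Int) (hL : 0 < L) (hn : 0 < n) :
    PySem.List.pyRange 0 n L = 0 :: PySem.List.pyRange L n L := by
  rw [PySem.List.pyRange_of_pos _ _ hL, PySem.List.pyRange_of_pos _ _ hL]
  by_cases h : L < n
  · rw [if_pos hn, if_pos h]
    have hq : (n - 0 + L - 1) / L = (n - L + L - 1) / L + 1 := by
      have : n - 0 + L - 1 = (n - L + L - 1) + 1 * L := by ring
      rw [this, Int.add_mul_ediv_right _ _ (by omega)]
    have hge : 0 ≤ (n - L + L - 1) / L := Int.ediv_nonneg (by omega) (by omega)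
    rw [hq]
    have : ((n - L + L - 1) / L + 1).toNat = ((n - L + L - 1) / L).toNat + 1 := by omega
    rw [this, List.range_succ_eq_map]
    simp only [List.map_cons, List.map_map]
    congr 1
    · simp
    · apply List.map_congr_left; intro k _; simp [Function.comp]; ring
  · rw [if_pos hn, if_neg h]
    have h1 : (n - 0 + L - 1) / L = 1 := by
      have he : n - 0 + L - 1 = (n - 1) + 1 * L := by ring
      rw [he, Int.add_mul_ediv_right _ _ (by omega : L ≠ 0),
        Int.ediv_eq_zero_of_lt (by omega) (by omega)]
      omega
    rw [h1]
    simp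

-- the chunk starts L, 2L, … of A's slicing, as chunks
lemma chunkTail_eq (cs : List Char) (LN : Nat) (hL : 0 < LN) (h2 : 2 * LN ≤ cs.length) :
    (PySem.List.pyRange (LN : Int) (cs.length : Int) (LN : Int)).map
        (fun i => PySem.List.slice cs (some i) (some (i + (LN : Int))))
      = (List.range' 1 ((cs.length - 1) / LN)).map (fun t => ch cs LN (t * LN)) := by
  rw [PySem.List.pyRange_of_pos _ _ (by exact_mod_cast hL)]
  rw [if_pos (by exact_mod_cast (by omega : LN < cs.length))]
  have hcnt : (((cs.length : Int) - (LN : Int) + (LN : Int) - 1) / (LN : Int)).toNat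
      = (cs.length - 1) / LN := by
    have h1 : (cs.length : Int) - (LN : Int) + (LN : Int) - 1 = ((cs.length - 1 : Nat) : Int) := by
      push_cast [Nat.cast_sub (by omega : 1 ≤ cs.length)]
      ring
    rw [h1, ← Int.natCast_div, Int.toNat_natCast]
  rw [hcnt, List.range'_eq_map_range, List.map_map, List.map_map]
  apply List.map_congr_left
  intro k _
  simp only [Function.comp]
  have hcast : ((LN : Int) + (LN : Int) * (k : Int)) = (((1 + k) * LN : Nat) : Int) := by
    push_cast; ring
  rw [hcast, PySem.List.slice_natCast_add cs ((1 + k) * LN) LN]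
  rfl

lemma count_cases (N L : Nat) (hL : 0 < L) (h2 : 2 * L ≤ N) :
    (N - 1) / L = if N % L = 0 then N / L - 1 else N / L := by
  have hd : N / L * L + N % L = N := Nat.div_add_mod' N L
  have hm : N % L < L := Nat.mod_lt N hL
  have hk : 2 ≤ N / L := (Nat.le_div_iff_mul_le hL).2 h2
  have he : (N / L - 1) * L + L = N / L * L := by
    have h0 : N / L - 1 + 1 = N / L := by omega
    conv_rhs => rw [← h0]
    ring
  by_cases hr : N % L = 0
  · rw [if_pos hr]
    apply Nat.div_eq_of_lt_le
    · omega
    · have h0 : N / L - 1 + 1 = N / L := by omega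
      rw [h0]; omega
  · rw [if_neg hr]
    apply Nat.div_eq_of_lt_le
    · omega
    · have h1 : (N / L + 1) * L = N / L * L + L := by ring
      omega

-- A's per-L encoded length, reduced to the common closed form
lemma A_side (cs : List Char) (LN : Nat) (hL : 0 < LN) (h2 : 2 * LN ≤ cs.length) :
    ((((PySem.List.pyRange 0 (cs.length : Int) (LN : Int)).map
          (fun i => PySem.List.slice cs (some i) (some (i + (LN : Int))))).foldl stepA []
        |>.foldl (fun e st => e ++ encodePiece st) []).length : Int)
      = ((cs.length % LN : Nat) : Int) + (Jfold cs LN).2 + (LN : Int) + digLen (Jfold cs LN).1 := by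
  have hNpos : 0 < cs.length := by omega
  have hk2 : 2 ≤ cs.length / LN := (Nat.le_div_iff_mul_le hL).2 h2
  have hkle : cs.length / LN * LN ≤ cs.length := Nat.div_mul_le_self _ _
  have hd := Nat.div_add_mod' cs.length LN
  have hm := Nat.mod_lt cs.length hL
  rw [pyRange_step_cons _ _ (by exact_mod_cast hL) (by exact_mod_cast hNpos)]
  rw [List.map_cons, List.foldl_cons]
  have hc0 : PySem.List.slice cs (some 0) (some (0 + (LN : Int))) = ch cs LN 0 := by
    have h := PySem.List.slice_natCast_add cs 0 LN
    simp only [Nat.cast_zero, zero_add, List.drop_zero] at h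
    simp only [zero_add, ch, List.drop_zero]
    exact h
  rw [hc0]
  have hfirst : stepA [] (ch cs LN 0) = [(ch cs LN 0, 1)] := by simp [stepA]
  rw [hfirst, chunkTail_eq cs LN hL h2, encode_len]
  have hmc := main_core ((List.range' 1 ((cs.length - 1) / LN)).map (fun t => ch cs LN (t * LN)))
    (ch cs LN 0) 1 0
  simp only [zero_add] at hmc
  simp only [List.length_nil, Nat.cast_zero, zero_add]
  rw [← hmc]
  have hch0 : ch cs LN 0 = ch cs LN ((1 - 1) * LN) := by norm_num
  rw [hch0, count_cases cs.length LN hL h2]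
  by_cases hr : cs.length % LN = 0
  · rw [if_pos hr]
    rw [loop_corr cs LN (cs.length / LN) hL hkle (cs.length / LN - 1) 1 1 0 (by omega)
      (by omega) (by omega)]
    have hrun := foldJN_run_pos cs LN (List.range' 1 (cs.length / LN - 1)) 1 0 (by omega)
    have hlen : (ch cs LN ((cs.length / LN - 1) * LN)).length = LN := by
      rw [length_ch]
      have : (cs.length / LN - 1) * LN + LN = cs.length / LN * LN := by
        have h0 : cs.length / LN - 1 + 1 = cs.length / LN := by omega
        conv_rhs => rw [← h0]
        ring
      omega
    rw [contribB_full _ LN _ hlen hrun]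
    unfold Jfold
    rw [hr]
    push_cast
    ring
  · rw [if_neg hr]
    have hsplit : List.range' 1 (cs.length / LN) = List.range' 1 (cs.length / LN - 1) ++ [cs.length / LN] := by
      have h0 : cs.length / LN = (cs.length / LN - 1) + 1 := by omega
      conv_lhs => rw [h0]
      rw [List.range'_1_concat]
      congr 2
      omega
    rw [hsplit, List.map_append, List.foldl_append]
    rw [loop_corr cs LN (cs.length / LN) hL hkle (cs.length / LN - 1) 1 1 0 (by omega)
      (by omega) (by omega)]
    have hrun := foldJN_run_pos cs LN (List.range' 1 (cs.length / LN - 1)) 1 0 (by omega)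
    have hlenprev : (ch cs LN ((cs.length / LN - 1) * LN)).length = LN := by
      rw [length_ch]
      have : (cs.length / LN - 1) * LN + LN = cs.length / LN * LN := by
        have h0 : cs.length / LN - 1 + 1 = cs.length / LN := by omega
        conv_rhs => rw [← h0]
        ring
      omega
    have hlenpart : (ch cs LN (cs.length / LN * LN)).length = cs.length % LN := by
      rw [length_ch]
      omega
    have hne : ch cs LN (cs.length / LN * LN) ≠ ch cs LN ((cs.length / LN - 1) * LN) := by
      intro h
      have := congrArg List.length h
      rw [hlenpart, hlenprev] at this
      omega
    simp only [List.map_cons, List.map_nil, List.foldl_cons, List.foldl_nil]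
    have hstep : stepB (ch cs LN ((cs.length / LN - 1) * LN),
        List.foldl (stepJN cs LN) (1, 0) (List.range' 1 (cs.length / LN - 1)))
        (ch cs LN (cs.length / LN * LN))
        = (ch cs LN (cs.length / LN * LN), 1,
            (List.foldl (stepJN cs LN) (1, 0) (List.range' 1 (cs.length / LN - 1))).2
              + (LN : Int) + digLen (List.foldl (stepJN cs LN) (1, 0) (List.range' 1 (cs.length / LN - 1))).1) := by
      simp only [stepB, beq_iff_eq, if_neg hne]
      rw [contribB_full _ LN _ hlenprev hrun]
      simp [add_assoc]
    rw [hstep]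
    have hc1 : contribB (ch cs LN (cs.length / LN * LN)) 1 = ((cs.length % LN : Nat) : Int) := by
      simp [contribB, hlenpart]
    simp only [hc1]
    unfold Jfold
    ring

-- B's per-L total, reduced to the common closed form
lemma B_side (cs : List Char) (LN : Nat) (hL : 0 < LN) (h2 : 2 * LN ≤ cs.length) :
    (let eqA := (PySem.List.pyRange ((cs.length : Int) - (LN : Int) - 1) (-1) (-1)).foldl (fun eq i =>
          PySem.List.pySetD eq i
            (if PySem.List.pyGet? cs i == PySem.List.pyGet? cs (i + (LN : Int))
             then PySem.List.pyGetD eq (i + 1) 0 + 1 else 0))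
          (List.replicate ((cs.length : Int) + 1).toNat 0)
     let fin := (PySem.List.pyRange 1 (PySem.Int.floordiv (cs.length : Int) (LN : Int)) 1).foldl (fun st j =>
        if (LN : Int) ≤ PySem.List.pyGetD eqA ((j - 1) * (LN : Int)) 0 then (st.1 + 1, st.2)
        else (1, st.2 + (LN : Int) + digLen st.1)) ((1 : Int), PySem.Int.mod (cs.length : Int) (LN : Int))
     fin.2 + (LN : Int) + digLen fin.1)
      = ((cs.length % LN : Nat) : Int) + (Jfold cs LN).2 + (LN : Int) + digLen (Jfold cs LN).1 := by
  simp only []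
  have hNpos : 0 < cs.length := by omega
  have hk2 : 2 ≤ cs.length / LN := (Nat.le_div_iff_mul_le hL).2 h2
  have hkle : cs.length / LN * LN ≤ cs.length := Nat.div_mul_le_self _ _
  have hd := Nat.div_add_mod' cs.length LN
  have hm := Nat.mod_lt cs.length hL
  -- 1. the eq array equals the foldr of eqStep over [0, n-L)
  have hrev : PySem.List.pyRange ((cs.length : Int) - (LN : Int) - 1) (-1) (-1)
      = (PySem.List.pyRange 0 ((cs.length : Int) - (LN : Int)) 1).reverse := by
    rw [PySem.List.pyRange_neg_one_eq_reverse]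
    norm_num
  have hcastNL : ((cs.length : Int) - (LN : Int)) = ((cs.length - LN : Nat) : Int) := by
    omega
  have hrepl : (((cs.length : Int)) + 1).toNat = cs.length + 1 := by omega
  have heqA : (PySem.List.pyRange ((cs.length : Int) - (LN : Int) - 1) (-1) (-1)).foldl (fun eq i =>
          PySem.List.pySetD eq i
            (if PySem.List.pyGet? cs i == PySem.List.pyGet? cs (i + (LN : Int))
             then PySem.List.pyGetD eq (i + 1) 0 + 1 else 0))
          (List.replicate ((cs.length : Int) + 1).toNat 0)
      = List.foldr (eqStep cs LN) (List.replicate (cs.length + 1) 0)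
          (List.range' 0 (cs.length - LN)) := by
    rw [hrev, List.foldl_reverse, hcastNL, hrepl, PySem.List.pyRange_one]
    have htn : (((cs.length - LN : Nat) : Int) - 0).toNat = cs.length - LN := by omega
    rw [htn, List.foldr_map, List.range_eq_range']
    have hfun : (fun (k : ℕ) (eq : List Int) =>
        PySem.List.pySetD eq ((0 : Int) + (k : Int))
          (if PySem.List.pyGet? cs ((0 : Int) + (k : Int)) == PySem.List.pyGet? cs ((0 : Int) + (k : Int) + (LN : Int))
           then PySem.List.pyGetD eq ((0 : Int) + (k : Int) + 1) 0 + 1 else 0)) = eqStep cs LN := by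
      funext k eq
      simp only [zero_add]
      rw [show ((k : Int) + (LN : Int)) = ((k + LN : Nat) : Int) by push_cast; ring,
        show ((k : Int) + 1) = ((k + 1 : Nat) : Int) by push_cast; ring,
        PySem.List.pySetD_natCast, PySem.List.pyGet?_natCast, PySem.List.pyGet?_natCast,
        PySem.List.pyGetD_natCast]
      unfold eqStep
      simp [beq_iff_eq]
    rw [hfun]
  rw [heqA, PySem.Int.floordiv_natCast, PySem.Int.mod_natCast]
  have hEqget : ∀ iN : Nat, iN < cs.length - LN →
      (List.foldr (eqStep cs LN) (List.replicate (cs.length + 1) 0)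
        (List.range' 0 (cs.length - LN))).getD iN 0 = eqFun cs LN iN := by
    intro iN hiN
    rw [eqBuild_spec cs LN (cs.length - LN) 0 (by omega) iN, if_pos (by omega)]
  -- 2. the j loop is the stepJN fold
  rw [PySem.List.pyRange_one 1 ((cs.length / LN : Nat) : Int)]
  have hcnt : (((cs.length / LN : Nat) : Int) - 1).toNat = cs.length / LN - 1 := by omega
  rw [hcnt, List.foldl_map]
  have hloop : List.foldl (fun (st : Int × Int) (k : ℕ) =>
        if (LN : Int) ≤ PySem.List.pyGetD (List.foldr (eqStep cs LN) (List.replicate (cs.length + 1) 0)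
              (List.range' 0 (cs.length - LN))) (((1 : Int) + (k : Int) - 1) * (LN : Int)) 0
        then (st.1 + 1, st.2) else (1, st.2 + (LN : Int) + digLen st.1))
        ((1 : Int), ((cs.length % LN : Nat) : Int)) (List.range (cs.length / LN - 1))
      = List.foldl (stepJN cs LN) ((1 : Int), ((cs.length % LN : Nat) : Int))
          (List.range' 1 (cs.length / LN - 1)) := by
    conv_rhs => rw [List.range'_eq_map_range, List.foldl_map]
    apply PySem.List.foldl_congr_mem
    intro st k hk
    rw [List.mem_range] at hk
    have hbound : (k + 2) * LN ≤ cs.length := by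
      calc (k + 2) * LN ≤ cs.length / LN * LN := Nat.mul_le_mul_right _ (by omega)
      _ ≤ cs.length := hkle
    have hidx : (((1 : Int) + (k : Int) - 1) * (LN : Int)) = ((k * LN : Nat) : Int) := by
      push_cast; ring
    rw [hidx, PySem.List.pyGetD_natCast, List.getD_eq_getElem?_getD,
      ← List.getD_eq_getElem?_getD, hEqget (k * LN) (by
        have : k * LN + 2 * LN ≤ cs.length := by
          have h1 : k * LN + 2 * LN = (k + 2) * LN := by ring
          omega
        omega)]
    have hiff : ((LN : Int) ≤ eqFun cs LN (k * LN)) ↔ ch cs LN (k * LN) = ch cs LN (k * LN + LN) := by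
      rw [chunk_eq_iff cs LN (k * LN) hL (by
        have h1 : k * LN + 2 * LN = (k + 2) * LN := by ring
        omega)]
    have h1 : 1 + k - 1 = k := by omega
    have h2 : (1 + k) * LN = k * LN + LN := by ring
    rw [stepJN, h1, h2]
    by_cases hcc : ch cs LN (k * LN) = ch cs LN (k * LN + LN)
    · rw [if_pos (hiff.2 hcc), if_pos hcc]
    · rw [if_neg (fun h => hcc (hiff.1 h)), if_neg hcc]
  rw [hloop, foldJN_shift]
  unfold Jfold
  ring
-- ===== VERDICT (by name: the statement is the Claim_ definition above) =====
theorem solution_spec : Claim_equal_solution := by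
  intro s _
  unfold Spec_solution solution solution_alt
  simp only []
  set cs := s.toList with hcs
  set n : Int := PySem.Str.len s with hn
  have hnlen : n = (cs.length : Int) := by
    rw [hn, hcs, PySem.Str.len_eq]
  set g : Int → Int := fun L =>
    (((((PySem.List.pyRange 0 n L).map
          (fun i => PySem.List.slice cs (some i) (some (i + L)))).foldl stepA []).foldl
        (fun e st => e ++ encodePiece st) []).length : Int) with hg
  have hA : (((PySem.List.pyRange 1 (PySem.Int.floordiv n 2 + 1) 1).map (fun L =>
        ((PySem.List.pyRange 0 n L).map
          (fun i => PySem.List.slice cs (some i) (some (i + L)))).foldl stepA []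
        |>.foldl (fun e st => e ++ encodePiece st) [])).map (fun e => (e.length : Int)))
      = (PySem.List.pyRange 1 (PySem.Int.floordiv n 2 + 1) 1).map g := by
    rw [List.map_map]; rfl
  rw [hA, minfold, List.foldl_map]
  apply PySem.List.foldl_congr_mem
  intro b L hmem
  have hLb := (PySem.List.mem_pyRange_one).1 hmem
  have hL1 : 1 ≤ L := hLb.1
  have hLhalf : L ≤ PySem.Int.floordiv n 2 := by omega
  have hfd : PySem.Int.floordiv n 2 = n / 2 := PySem.Int.floordiv_eq_ediv_of_pos (by omega)
  have hnpos : 0 < n := by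
    rw [hfd] at hLhalf
    omega
  have h2L : 2 * L ≤ n := by
    rw [hfd] at hLhalf
    omega
  set LN := L.toNat with hLN
  have hLcast : L = (LN : Int) := by omega
  have hLpos : 0 < LN := by omega
  have h2 : 2 * LN ≤ cs.length := by
    rw [hnlen, hLcast] at h2L
    exact_mod_cast h2L
  have hval := (A_side cs LN hLpos h2).trans (B_side cs LN hLpos h2).symm
  simp only [] at hval
  rw [hg, hnlen, hLcast]
  simp only []
  rw [hval]
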